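-- pv_equiv track=rewrite | github.com/senhorx/busca-leis | Crawler.py | BuscaInciso
-- ===== SOURCE A (Python) =====
-- def BuscaInfo(valor,info):
--     return info.lower() in valor.lower()
--
-- def BuscaInciso(lista,antA,proxA,antP,proxP,info):
--     anterior = False
--     proximo = False
--     anteriorP = False
--     proximoP = False
--     for result in lista:
--         if BuscaInfo(result,antA):
--             anterior = True
--         if BuscaInfo(result, proxA):
--             proximo = True
--         if antP != "" and proxP != "":
--             if BuscaInfo(result,antP):
--                 anteriorP = True
--             if BuscaInfo(result,proxP):
--                 proximoP = True
--             if BuscaInfo(result, info) and anterior==True and proximo==False and anteriorP==True and proximoP==False: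
--                 return result
--         else:
--             if BuscaInfo(result, info) and anterior==True and proximo==False:
--                 return result
--     return "Não encontrado"
-- ===== SOURCE B (Python) =====
-- def BuscaInfo(valor, info):
--     return info.lower() in valor.lower()
--
-- def _first_idx(lista, pat):
--     for i, r in enumerate(lista):
--         if BuscaInfo(r, pat):
--             return i
--     return len(lista)
--
-- def BuscaInciso(lista, antA, proxA, antP, proxP, info):
--     fa = _first_idx(lista, antA)
--     fp = _first_idx(lista, proxA)
--     pmode = antP != "" and proxP != ""
--     if pmode:
--         fap = _first_idx(lista, antP)
--         fpp = _first_idx(lista, proxP)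
--     for i, r in enumerate(lista):
--         if BuscaInfo(r, info) and fa <= i < fp and (not pmode or fap <= i < fpp):
--             return r
--     return "Não encontrado"
-- ===== Notes on version B (the rewrite author's own statement) =====
-- stated objective: alternative
-- what changed: Replaces A's single pass that accumulates four boolean flags with a boundaries-then-window decomposition: first compute the first index matching each of antA/proxA (and antP/proxP in P-mode) with len(lista) as sentinel, then return the first element matching info whose index lies in the half-open windows [firstAntA, firstProxA) (and [firstAntP, firstProxP) in P-mode).
import Mathlib
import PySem

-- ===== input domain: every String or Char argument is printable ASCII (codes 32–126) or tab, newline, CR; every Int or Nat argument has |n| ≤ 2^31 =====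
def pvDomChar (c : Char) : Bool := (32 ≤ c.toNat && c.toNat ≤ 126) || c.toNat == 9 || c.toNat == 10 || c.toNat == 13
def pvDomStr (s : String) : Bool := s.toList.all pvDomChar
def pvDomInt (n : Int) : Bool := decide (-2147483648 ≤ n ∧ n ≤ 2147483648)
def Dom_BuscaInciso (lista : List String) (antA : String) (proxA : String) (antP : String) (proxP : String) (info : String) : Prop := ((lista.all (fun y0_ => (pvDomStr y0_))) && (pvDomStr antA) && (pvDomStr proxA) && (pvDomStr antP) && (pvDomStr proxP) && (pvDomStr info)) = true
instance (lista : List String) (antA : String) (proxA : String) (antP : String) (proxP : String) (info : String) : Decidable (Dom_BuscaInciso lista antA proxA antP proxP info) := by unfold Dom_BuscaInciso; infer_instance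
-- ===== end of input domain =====

-- B replaces A's flag-accumulating scan by a "first boundary indices, then filtered window scan" decomposition (objective: alternative, same cost).

-- ===== PORT A =====
-- BuscaInfo(valor, info) = info.lower() in valor.lower()
def pvBuscaInfo (valor info : String) : Bool :=
  PySem.Str.isIn (PySem.Str.lower info) (PySem.Str.lower valor)

-- A's for-loop over lista carrying the four boolean flags
def pvLoopA (antA proxA antP proxP info : String) :
    List String → Bool → Bool → Bool → Bool → String
  | [], _, _, _, _ => "Não encontrado"
  | r :: rest, ant, prox, ap, pp =>
    let ant := if pvBuscaInfo r antA then true else ant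
    let prox := if pvBuscaInfo r proxA then true else prox
    if antP ≠ "" ∧ proxP ≠ "" then
      let ap := if pvBuscaInfo r antP then true else ap
      let pp := if pvBuscaInfo r proxP then true else pp
      if pvBuscaInfo r info && ant && !prox && ap && !pp then r
      else pvLoopA antA proxA antP proxP info rest ant prox ap pp
    else
      if pvBuscaInfo r info && ant && !prox then r
      else pvLoopA antA proxA antP proxP info rest ant prox ap pp

def BuscaInciso (lista : List String) (antA : String) (proxA : String) (antP : String) (proxP : String) (info : String) : String :=
  pvLoopA antA proxA antP proxP info lista false false false false

-- ===== PORT B =====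
-- _first_idx(lista, pat): first index whose element matches pat, len(lista) if none
def pvFirstIdx (lista : List String) (pat : String) : Nat :=
  match lista with
  | [] => 0
  | r :: rs => if pvBuscaInfo r pat then 0 else pvFirstIdx rs pat + 1

-- B's enumerate-loop: first element in the boundary window that matches info
def pvLoopB (info : String) (fa fp : Nat) (pmode : Bool) (fap fpp : Nat) :
    Nat → List String → String
  | _, [] => "Não encontrado"
  | i, r :: rest =>
    if pvBuscaInfo r info && decide (fa ≤ i) && decide (i < fp) &&
        (!pmode || (decide (fap ≤ i) && decide (i < fpp))) then r
    else pvLoopB info fa fp pmode fap fpp (i + 1) rest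

def BuscaInciso_alt (lista : List String) (antA : String) (proxA : String) (antP : String) (proxP : String) (info : String) : String :=
  let fa := pvFirstIdx lista antA
  let fp := pvFirstIdx lista proxA
  if antP ≠ "" ∧ proxP ≠ "" then
    pvLoopB info fa fp true (pvFirstIdx lista antP) (pvFirstIdx lista proxP) 0 lista
  else
    pvLoopB info fa fp false 0 0 0 lista

-- ===== PRECONDITION & SPEC =====
def Spec_BuscaInciso (lista : List String) (antA : String) (proxA : String) (antP : String) (proxP : String) (info : String) (out : String) : Prop := out = BuscaInciso_alt lista antA proxA antP proxP info
instance (lista : List String) (antA : String) (proxA : String) (antP : String) (proxP : String) (info : String) (out : String) : Decidable (Spec_BuscaInciso lista antA proxA antP proxP info out) := by unfold Spec_BuscaInciso; infer_instance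

-- ===== CLAIM (what is proved, stated in full; the proofs are below) =====
def Claim_equal_BuscaInciso : Prop := ∀ (lista : List String) (antA : String) (proxA : String) (antP : String) (proxP : String) (info : String), Dom_BuscaInciso lista antA proxA antP proxP info → Spec_BuscaInciso lista antA proxA antP proxP info (BuscaInciso lista antA proxA antP proxP info)

-- ===== LEMMAS AND PROOFS =====

-- generic "first element whose (index, value) satisfies C" scan
def pvFFind (C : Nat → String → Bool) : Nat → List String → String
  | _, [] => "Não encontrado"
  | i, r :: rest => if C i r then r else pvFFind C (i + 1) rest

theorem pvFFind_congr (l : List String) (C1 C2 : Nat → String → Bool) (i1 i2 : Nat)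
    (h : ∀ k r, C1 (i1 + k) r = C2 (i2 + k) r) : pvFFind C1 i1 l = pvFFind C2 i2 l := by
  induction l generalizing i1 i2 with
  | nil => rfl
  | cons r rest ih =>
    have h0 : C1 i1 r = C2 i2 r := by simpa using h 0 r
    simp only [pvFFind]
    rw [h0]
    by_cases hc : C2 i2 r <;> simp [hc]
    exact ih (i1 + 1) (i2 + 1) (fun k r' => by
      have := h (k + 1) r'
      simpa [Nat.add_assoc, Nat.add_comm, Nat.add_left_comm] using this)

-- the flag/boundary condition: what A's flags amount to, phrased with first indices
def pvCond (antA proxA antP proxP info : String) (pmode ant prox ap pp : Bool)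
    (l : List String) : Nat → String → Bool :=
  fun j r =>
    pvBuscaInfo r info &&
    (ant || decide (pvFirstIdx l antA ≤ j)) &&
    !(prox || decide (pvFirstIdx l proxA ≤ j)) &&
    (!pmode || ((ap || decide (pvFirstIdx l antP ≤ j)) && !(pp || decide (pvFirstIdx l proxP ≤ j))))

theorem pvIfOr (m b : Bool) : (if m = true then true else b) = (m || b) := by
  cases m <;> simp

theorem pvCond_false_ap (antA proxA antP proxP info : String) (ant prox ap pp ap' pp' : Bool)
    (l : List String) :
    pvCond antA proxA antP proxP info false ant prox ap pp l =
      pvCond antA proxA antP proxP info false ant prox ap' pp' l := by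
  funext j r; simp [pvCond]

theorem pvCond_shift (antA proxA antP proxP info : String) (p ant prox ap pp : Bool)
    (r : String) (rs : List String) (k : Nat) (r' : String) :
    pvCond antA proxA antP proxP info p
        (pvBuscaInfo r antA || ant) (pvBuscaInfo r proxA || prox)
        (pvBuscaInfo r antP || ap) (pvBuscaInfo r proxP || pp) rs k r' =
      pvCond antA proxA antP proxP info p ant prox ap pp (r :: rs) (k + 1) r' := by
  simp only [pvCond, pvFirstIdx]
  by_cases hA : pvBuscaInfo r antA = true <;> by_cases hP : pvBuscaInfo r proxA = true <;>
    by_cases hAP : pvBuscaInfo r antP = true <;> by_cases hPP : pvBuscaInfo r proxP = true <;>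
      simp [hA, hP, hAP, hPP, Bool.or_comm]

theorem pvCond_head (antA proxA antP proxP info : String) (p ant prox ap pp : Bool)
    (r : String) (rs : List String) :
    pvCond antA proxA antP proxP info p ant prox ap pp (r :: rs) 0 r =
      (pvBuscaInfo r info && (pvBuscaInfo r antA || ant) && !(pvBuscaInfo r proxA || prox) &&
        (!p || ((pvBuscaInfo r antP || ap) && !(pvBuscaInfo r proxP || pp)))) := by
  simp only [pvCond, pvFirstIdx]
  by_cases hA : pvBuscaInfo r antA = true <;> by_cases hP : pvBuscaInfo r proxA = true <;>
    by_cases hAP : pvBuscaInfo r antP = true <;> by_cases hPP : pvBuscaInfo r proxP = true <;>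
      simp [hA, hP, hAP, hPP, Bool.or_comm]

theorem pvLoopA_eq_ffind (antA proxA antP proxP info : String)
    (l : List String) (ant prox ap pp : Bool) :
    pvLoopA antA proxA antP proxP info l ant prox ap pp =
      pvFFind (pvCond antA proxA antP proxP info
        (decide (antP ≠ "" ∧ proxP ≠ "")) ant prox ap pp l) 0 l := by
  induction l generalizing ant prox ap pp with
  | nil => rfl
  | cons r rs ih =>
    simp only [pvLoopA, pvFFind, pvIfOr]
    by_cases hp : antP ≠ "" ∧ proxP ≠ ""
    · have hd : decide (antP ≠ "" ∧ proxP ≠ "") = true := by simp [hp]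
      rw [if_pos hp, pvCond_head, hd]
      by_cases hc : (pvBuscaInfo r info && (pvBuscaInfo r antA || ant) && !(pvBuscaInfo r proxA || prox) &&
          (!(true : Bool) || ((pvBuscaInfo r antP || ap) && !(pvBuscaInfo r proxP || pp)))) = true
      · rw [if_pos hc, if_pos]
        · simpa [Bool.and_assoc] using hc
      · rw [if_neg hc, if_neg]
        · rw [ih]
          refine pvFFind_congr rs _ _ 0 1 (fun k r' => ?_)
          rw [hd, Nat.zero_add, Nat.add_comm 1 k]
          exact pvCond_shift antA proxA antP proxP info true ant prox ap pp r rs k r'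
        · intro h; exact hc (by simpa [Bool.and_assoc] using h)
    · have hd : decide (antP ≠ "" ∧ proxP ≠ "") = false := by simp at hp ⊢; tauto
      rw [if_neg hp, pvCond_head, hd]
      by_cases hc : (pvBuscaInfo r info && (pvBuscaInfo r antA || ant) && !(pvBuscaInfo r proxA || prox)) = true
      · rw [if_pos hc, if_pos]
        · simpa using hc
      · rw [if_neg hc, if_neg]
        · rw [ih, hd]
          rw [pvCond_false_ap antA proxA antP proxP info (pvBuscaInfo r antA || ant)
            (pvBuscaInfo r proxA || prox) ap pp
            (pvBuscaInfo r antP || ap) (pvBuscaInfo r proxP || pp) rs]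
          refine pvFFind_congr rs _ _ 0 1 (fun k r' => ?_)
          rw [Nat.zero_add, Nat.add_comm 1 k]
          exact pvCond_shift antA proxA antP proxP info false ant prox ap pp r rs k r'
        · intro h; exact hc (by simpa using h)

theorem pvDecideLt (a b : Nat) : decide (a < b) = !decide (b ≤ a) := by
  by_cases h : b ≤ a
  · simp [h, Nat.not_lt.mpr h]
  · simp [h, Nat.lt_of_not_le h]

theorem pvLoopB_eq_ffind (info : String) (fa fp : Nat) (p : Bool) (fap fpp : Nat)
    (i : Nat) (l : List String) :
    pvLoopB info fa fp p fap fpp i l =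
      pvFFind (fun j r => pvBuscaInfo r info && decide (fa ≤ j) && decide (j < fp) &&
        (!p || (decide (fap ≤ j) && decide (j < fpp)))) i l := by
  induction l generalizing i with
  | nil => rfl
  | cons r rs ih => simp only [pvLoopB, pvFFind, ih]

theorem BuscaInciso_spec' (lista : List String) (antA proxA antP proxP info : String) :
    BuscaInciso lista antA proxA antP proxP info = BuscaInciso_alt lista antA proxA antP proxP info := by
  unfold BuscaInciso BuscaInciso_alt
  rw [pvLoopA_eq_ffind]
  by_cases hp : antP ≠ "" ∧ proxP ≠ ""
  · have hd : decide (antP ≠ "" ∧ proxP ≠ "") = true := by simp [hp]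
    rw [if_pos hp, hd, pvLoopB_eq_ffind]
    refine pvFFind_congr lista _ _ 0 0 (fun k r => ?_)
    simp [pvCond, Bool.and_assoc, pvDecideLt]
  · have hd : decide (antP ≠ "" ∧ proxP ≠ "") = false := by simp at hp ⊢; tauto
    rw [if_neg hp, hd, pvLoopB_eq_ffind]
    refine pvFFind_congr lista _ _ 0 0 (fun k r => ?_)
    simp [pvCond, pvDecideLt]

-- ===== VERDICT (by name: the statement is the Claim_ definition above) =====
theorem BuscaInciso_spec : Claim_equal_BuscaInciso := by
  intro lista antA proxA antP proxP info _
  exact BuscaInciso_spec' lista antA proxA antP proxP info
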